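-- pv_equiv track=rewrite | github.com/igmarie/Python-password-checker-2021 | main.py | keyboardCheck
-- ===== SOURCE A (Python) =====
-- def seq(string):
--     for i in range(len(string)-2):
--         yield string[i:i+3]
--     return
--
-- def keyboardCheck(password):
--     penalty = 0
--     lines = ["qwertyuiop",
--              "asdfghjkl",
--              "zxcvbnm"]
--     for line in lines:
--         for s in seq(line):
--             if s in password.lower():
--                 penalty += 5
--     return penalty
-- ===== SOURCE B (Python) =====
-- _KEYBOARD_TRIGRAMS = frozenset(
--     line[i:i+3]
--     for line in ("qwertyuiop", "asdfghjkl", "zxcvbnm")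
--     for i in range(len(line) - 2)
-- )
--
-- def keyboardCheck(password):
--     # Single pass over the password: collect which keyboard trigrams occur,
--     # then charge 5 per distinct trigram found.  Correct because the 20
--     # keyboard trigrams are pairwise distinct, so A adds 5 exactly once per
--     # keyboard trigram that occurs in the lowered password.
--     pw = password.lower()
--     found = set()
--     for i in range(len(pw) - 2):
--         t = pw[i:i+3]
--         if t in _KEYBOARD_TRIGRAMS:
--             found.add(t)
--     return 5 * len(found)
-- ===== Notes on version B (the rewrite author's own statement) =====
-- stated objective: alternative
-- what changed: B inverts the iteration: instead of A's 20 substring scans of the password (one per keyboard trigram), B makes a single pass over the lowered password, collecting into a set which of the precomputed keyboard trigrams occur, and returns 5 times the size of that set; correctness rests on the 20 keyboard trigrams being pairwise distinct.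
import Mathlib
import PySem

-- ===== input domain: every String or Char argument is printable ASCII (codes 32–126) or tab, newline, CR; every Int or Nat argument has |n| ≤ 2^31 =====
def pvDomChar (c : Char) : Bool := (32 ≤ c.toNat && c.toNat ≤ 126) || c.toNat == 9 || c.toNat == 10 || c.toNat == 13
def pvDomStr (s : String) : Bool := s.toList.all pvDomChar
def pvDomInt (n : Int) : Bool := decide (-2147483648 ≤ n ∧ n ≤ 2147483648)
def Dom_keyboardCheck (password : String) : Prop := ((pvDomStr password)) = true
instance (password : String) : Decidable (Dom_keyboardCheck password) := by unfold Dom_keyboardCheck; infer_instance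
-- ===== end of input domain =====

-- B inverts A's iteration: one pass over the lowered password collecting which of the 20
-- (pairwise distinct) keyboard trigrams occur, returning 5 * |found| (alternative algorithm).

-- ===== PORT A =====
-- generator seq(string): yields the slices string[i:i+3] for i in range(len(string)-2)
def pySeq (s : List Char) : List (List Char) :=
  (PySem.List.pyRange 0 ((s.length : Int) - 2) 1).map
    (fun i => PySem.List.slice s (some i) (some (i + 3)))

def keyboardCheck (password : String) : Int :=
  let lines : List (List Char) := ["qwertyuiop".toList, "asdfghjkl".toList, "zxcvbnm".toList]
  lines.foldl (fun penalty line =>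
    (pySeq line).foldl (fun p s =>
      -- 's in password.lower()' (lower() recomputed per test, as in the Python)
      if PySem.Chars.isIn s (PySem.Chars.lower password.toList) then p + 5 else p) penalty) 0

-- ===== PORT B =====
-- module-level constant _KEYBOARD_TRIGRAMS (a frozenset built by the comprehension)
def kbTrigrams : PySem.Set (List Char) :=
  PySem.Set.ofList
    ((["qwertyuiop".toList, "asdfghjkl".toList, "zxcvbnm".toList].flatMap
      (fun line => (PySem.List.pyRange 0 ((line.length : Int) - 2) 1).map
        (fun i => PySem.List.slice line (some i) (some (i + 3))))))

def keyboardCheck_alt (password : String) : Int :=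
  let pw := PySem.Chars.lower password.toList
  let found := (PySem.List.pyRange 0 ((pw.length : Int) - 2) 1).foldl
    (fun fs i =>
      if PySem.Set.contains kbTrigrams (PySem.List.slice pw (some i) (some (i + 3)))
      then PySem.Set.add fs (PySem.List.slice pw (some i) (some (i + 3))) else fs)
    PySem.Set.empty
  5 * (PySem.Set.len found : Int)

-- ===== PRECONDITION & SPEC =====
def Spec_keyboardCheck (password : String) (out : Int) : Prop := out = keyboardCheck_alt password
instance (password : String) (out : Int) : Decidable (Spec_keyboardCheck password out) := by unfold Spec_keyboardCheck; infer_instance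

-- ===== CLAIM (what is proved, stated in full; the proofs are below) =====
def Claim_equal_keyboardCheck : Prop := ∀ (password : String), Dom_keyboardCheck password → Spec_keyboardCheck password (keyboardCheck password)

-- ===== LEMMAS AND PROOFS =====

-- a length-3 list is an infix of pw iff it is one of pw's 3-char windows
theorem window_iff_infix (pw s : List Char) (h3 : s.length = 3) :
    (∃ i, i ∈ PySem.List.pyRange 0 ((pw.length : Int) - 2) 1 ∧
        PySem.List.slice pw (some i) (some (i + 3)) = s) ↔ s <:+: pw := by
  constructor
  · rintro ⟨i, hmem, hsl⟩
    rw [PySem.List.mem_pyRange_one] at hmem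
    obtain ⟨h0, _⟩ := hmem
    rw [PySem.List.slice_toNat pw h0 (by omega : (0:Int) ≤ i + 3)] at hsl
    subst hsl
    exact ((List.take_prefix _ _).isInfix.trans (List.drop_suffix _ _).isInfix)
  · rintro ⟨t, u, h⟩
    refine ⟨(t.length : Int), ?_, ?_⟩
    · rw [PySem.List.mem_pyRange_one]
      have : pw.length = t.length + (s.length + u.length) := by
        rw [← h]; simp [List.length_append]
      constructor
      · positivity
      · omega
    · rw [PySem.List.slice_toNat pw (by positivity) (by positivity)]
      have h1 : ((t.length : Int)).toNat = t.length := by omega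
      have h2 : ((t.length : Int) + 3).toNat = t.length + 3 := by omega
      rw [h1, h2, ← h]
      have : (t ++ (s ++ u)).drop t.length = s ++ u := List.drop_left (l₁ := t) (l₂ := s ++ u)
      rw [List.append_assoc, this]
      have := List.take_left (l₁ := s) (l₂ := u)
      rw [← h3]; simp [this]

-- A's inner fold counts: starting from p it adds 5 per element passing the test
theorem foldA_count (c : List Char → Bool) (L : List (List Char)) (p : Int) :
    L.foldl (fun p s => if c s then p + 5 else p) p
      = p + 5 * ((L.filter c).length : Int) := by
  induction L generalizing p with
  | nil => simp
  | cons s L ih =>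
    by_cases h : c s <;> simp [List.foldl_cons, ih, h]
    ring

-- B's conditional-add fold is 'ofList (filtered windows)'
theorem foldB_ofList (c : List Char → Bool) (f : Int → List Char) (L : List Int)
    (s : PySem.Set (List Char)) :
    L.foldl (fun fs i => if c (f i) then PySem.Set.add fs (f i) else fs) s
      = ((L.map f).filter c).foldl PySem.Set.add s := by
  induction L generalizing s with
  | nil => rfl
  | cons i L ih =>
    by_cases h : c (f i) <;> simp [List.foldl_cons, h, ih]

-- the 20 keyboard trigrams, as the flat list the constant dedups (it is already Nodup)
def kbList : List (List Char) :=
  ["qwertyuiop".toList, "asdfghjkl".toList, "zxcvbnm".toList].flatMap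
    (fun line => (PySem.List.pyRange 0 ((line.length : Int) - 2) 1).map
      (fun i => PySem.List.slice line (some i) (some (i + 3))))

theorem kbTrigrams_eq : kbTrigrams = PySem.Set.ofList kbList := rfl

theorem kbList_nodup : kbList.Nodup := by decide

theorem kbList_len3 : ∀ t ∈ kbList, t.length = 3 := by decide

-- membership in B's found set ↔ keyboard trigram ∧ infix of pw
theorem mem_found (pw : List Char) (t : List Char) :
    (t ∈ (((PySem.List.pyRange 0 ((pw.length : Int) - 2) 1).map
          (fun i => PySem.List.slice pw (some i) (some (i + 3)))).filter
          (fun u => PySem.Set.contains kbTrigrams u)))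
      ↔ (t ∈ kbList ∧ t <:+: pw) := by
  rw [List.mem_filter]
  have hk : PySem.Set.contains kbTrigrams t = true ↔ t ∈ kbList := by
    rw [kbTrigrams_eq, PySem.Set.contains_iff, PySem.Set.mem_ofList]
  constructor
  · rintro ⟨hw, hc⟩
    have htk := hk.mp hc
    refine ⟨htk, ?_⟩
    rw [List.mem_map] at hw
    obtain ⟨i, hi, hsl⟩ := hw
    exact (window_iff_infix pw t (kbList_len3 t htk)).mp ⟨i, hi, hsl⟩
  · rintro ⟨htk, hinf⟩
    obtain ⟨i, hi, hsl⟩ := (window_iff_infix pw t (kbList_len3 t htk)).mpr hinf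
    exact ⟨List.mem_map.mpr ⟨i, hi, hsl⟩, hk.mpr htk⟩

-- ===== VERDICT (by name: the statement is the Claim_ definition above) =====
theorem keyboardCheck_spec : Claim_equal_keyboardCheck := by
  intro password _
  unfold Spec_keyboardCheck keyboardCheck keyboardCheck_alt
  set pw := PySem.Chars.lower password.toList with hpw
  -- A's side: 5 * number of keyboard trigrams that are infixes of pw
  have hA : (["qwertyuiop".toList, "asdfghjkl".toList, "zxcvbnm".toList] :
        List (List Char)).foldl (fun penalty line =>
        (pySeq line).foldl (fun p s =>
          if PySem.Chars.isIn s pw then p + 5 else p) penalty) 0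
      = 5 * (((kbList.filter (fun s => PySem.Chars.isIn s pw)).length : Int)) := by
    simp only [List.foldl_cons, List.foldl_nil, pySeq, foldA_count]
    unfold kbList
    simp only [List.flatMap_cons, List.flatMap_nil, List.append_nil, List.filter_append,
      List.length_append]
    push_cast; ring
  rw [hA]
  -- B's side (zeta-reduce the port's local bindings)
  show 5 * (((kbList.filter (fun s => PySem.Chars.isIn s pw)).length : Int))
      = 5 * ((PySem.Set.len ((PySem.List.pyRange 0 ((pw.length : Int) - 2) 1).foldl
          (fun fs i =>
            if PySem.Set.contains kbTrigrams (PySem.List.slice pw (some i) (some (i + 3)))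
            then PySem.Set.add fs (PySem.List.slice pw (some i) (some (i + 3))) else fs)
          PySem.Set.empty)) : Int)
  rw [foldB_ofList (fun u => PySem.Set.contains kbTrigrams u)
    (fun i => PySem.List.slice pw (some i) (some (i + 3)))]
  have hofl : ∀ (M : List (List Char)),
      M.foldl PySem.Set.add PySem.Set.empty = PySem.Set.ofList M := by
    intro M; rw [PySem.Set.ofList_eq_foldl]; rfl
  rw [hofl]
  set M := (((PySem.List.pyRange 0 ((pw.length : Int) - 2) 1).map
      (fun i => PySem.List.slice pw (some i) (some (i + 3)))).filter
      (fun u => PySem.Set.contains kbTrigrams u)) with hM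
  -- the two filtered lists are permutations: both Nodup with the same members
  have hperm : (kbList.filter (fun s => PySem.Chars.isIn s pw)).Perm (PySem.Set.ofList M) := by
    rw [List.perm_ext_iff_of_nodup (kbList_nodup.filter _) (PySem.Set.nodup_ofList M)]
    intro t
    rw [List.mem_filter, PySem.Set.mem_ofList, hM, mem_found pw t]
    constructor
    · rintro ⟨h1, h2⟩; exact ⟨h1, (PySem.Chars.isIn_iff_infix _ _).mp h2⟩
    · rintro ⟨h1, h2⟩; exact ⟨h1, (PySem.Chars.isIn_iff_infix _ _).mpr h2⟩
  have hlen := hperm.length_eq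
  have hLen : PySem.Set.len (PySem.Set.ofList M) = (PySem.Set.ofList M).length := rfl
  rw [hLen, ← hlen]
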